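-- pv_equiv track=rewrite | github.com/rafaels100/Probabilidad-LCD-UBA | Practicas/Practica_0/ej_02/ej02.py | rec
-- ===== SOURCE A (Python) =====
-- def rec(n, m, nietos):
--     if nietos == 0:
--         #si ya reparti caramelos a todos los nietos y aun me quedan caramelos por repartir, esta es una forma valida de hacerlo. Sumo 1 a la recursion
--         #considero la variable nietos como la cantidad de nietos, no el indice del nieto en el array de nietos. Por eso empiezo desde el total de nietos
--         #y no desde el total - 1. Cuando ya me quedan 0 nietos por repartir caramelos, ahi termina mi recursion.
--         return 1
--     elif n == 0 or m == 0:
--         #ya me quede sin alguno de los caramelos, debo repartirle al resto de mis nietos todos los que me quedan del mismo sabor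
--         #es el fin de un camino, de una forma de repartir caramelos
--         #(esto asumiendo que me quedan suficientes caramelos del otro sabor para darle al resto de mis nietos. Puede que algunos se queden
--         #sin caramelos si no tengo esta consideracion).
--         #si me quede sin caramelos de naranja, debo ver que me alcanzan con los que me quedan de limon para todos los nietos que faltan
--         if n == 0 and (m - nietos) >= 0:
--             return 1
--         #si en cambio me quede sin caramelos de limon, deben ser los de naranja los que deben alcanzar para el resto de nietos
--         elif (n - nietos) >= 0:
--             return 1
--         else:
--             #en caso de que los caramelos de uno u otro sabor no me alcanzen para los nietos restantes, esta no es una forma valida de repartir los caramelos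
--             #no sumo nada en la recursion
--             return 0
--     else:
--         nietos -= 1
--         return rec(n - 1, m, nietos) + rec(n, m - 1, nietos)
--
-- nietos = 7
--
-- n = m = 10
--
-- n = m = 10
-- ===== SOURCE B (Python) =====
-- def rec(n, m, nietos):
--     # Bottom-up DP over antidiagonal rows (Pascal-style), O(nietos^2) instead of O(2^nietos).
--     if nietos == 0:
--         return 1
--     if n == 0:
--         return 1 if m >= nietos else 0
--     if m == 0:
--         return 1 if n >= nietos else 0
--     if n > 0 and m > 0 and nietos > n + m:
--         # fewer candies than grandchildren left: no valid distribution
--         return 0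
--     row = [1] * (nietos + 1)
--     for c in range(1, nietos + 1):
--         new = []
--         for i in range(nietos - c + 1):
--             a = n - i
--             b = m - nietos + c + i
--             if a == 0:
--                 new.append(1 if b >= c else 0)
--             elif b == 0:
--                 new.append(1 if a >= c else 0)
--             else:
--                 new.append(row[i] + row[i + 1])
--         row = new
--     return row[0]
-- ===== Notes on version B (the rewrite author's own statement) =====
-- stated objective: faster
-- what changed: Replaces A's exponential top-down branching recursion by a bottom-up Pascal-style row DP over antidiagonals of the state space, computing each distinct state once.
-- outside the precondition, e.g. on rec(1, 1, -1): A returns 2, B raises IndexError; on rec(-1, -1, -1): A raises RecursionError, B raises IndexError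
import Mathlib
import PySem

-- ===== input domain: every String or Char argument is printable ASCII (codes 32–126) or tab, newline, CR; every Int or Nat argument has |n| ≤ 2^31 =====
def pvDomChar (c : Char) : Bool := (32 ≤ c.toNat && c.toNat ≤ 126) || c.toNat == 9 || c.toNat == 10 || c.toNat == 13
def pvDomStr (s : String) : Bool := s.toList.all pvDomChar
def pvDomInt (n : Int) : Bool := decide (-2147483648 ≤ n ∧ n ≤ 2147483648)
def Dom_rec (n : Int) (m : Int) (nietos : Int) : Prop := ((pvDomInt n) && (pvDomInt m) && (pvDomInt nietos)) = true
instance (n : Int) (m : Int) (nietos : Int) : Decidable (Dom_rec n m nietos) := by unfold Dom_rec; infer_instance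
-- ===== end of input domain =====

-- B replaces A's exponential branching recursion by a bottom-up Pascal-style row DP (O(nietos^2)); equivalence proved for nietos ≥ 0.

-- ===== PORT A =====
-- Fuel makes the same recursion total; for nietos ≥ 0 the depth is exactly nietos, so fuel nietos.toNat+1 never runs out.
def recGo (fuel : Nat) (n : Int) (m : Int) (nietos : Int) : Int :=
  match fuel with
  | 0 => 0
  | Nat.succ fuel =>
    if nietos = 0 then 1
    else if n = 0 ∨ m = 0 then
      if n = 0 ∧ m - nietos ≥ 0 then 1
      else if n - nietos ≥ 0 then 1
      else 0
    else recGo fuel (n - 1) m (nietos - 1) + recGo fuel n (m - 1) (nietos - 1)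

def rec (n : Int) (m : Int) (nietos : Int) : Int := recGo (nietos.toNat + 1) n m nietos

-- ===== PORT B =====
-- one row-update step of the DP: new[i] from row[i], row[i+1] (the body of B's inner loop; c = cIdx+1)
def recStep (n : Int) (m : Int) (nietos : Int) (row : List Int) (cIdx : Nat) : List Int :=
  let c : Int := (cIdx : Int) + 1
  (List.range (nietos.toNat - (cIdx + 1) + 1)).map (fun (iN : Nat) =>
    let i : Int := (iN : Int)
    let a := n - i
    let b := m - nietos + c + i
    if a = 0 then (if b ≥ c then 1 else 0)
    else if b = 0 then (if a ≥ c then 1 else 0)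
    else row.getD iN 0 + row.getD (iN + 1) 0)

def rec_alt (n : Int) (m : Int) (nietos : Int) : Int :=
  if nietos = 0 then 1
  else if n = 0 then (if m ≥ nietos then 1 else 0)
  else if m = 0 then (if n ≥ nietos then 1 else 0)
  else if 0 < n ∧ 0 < m ∧ n + m < nietos then 0
  else
    let row0 : List Int := List.replicate ((nietos + 1).toNat) 1
    let rowK := (List.range nietos.toNat).foldl (recStep n m nietos) row0
    rowK.headD 0

-- ===== PRECONDITION & SPEC =====
-- Pre_ restricts to the natural domain of counts (nietos ≥ 0): on negative nietos A either recurses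
-- forever (RecursionError) or returns a lattice-path count, while B raises IndexError there.
def Pre_rec (n : Int) (m : Int) (nietos : Int) : Prop := 0 ≤ nietos
instance (n : Int) (m : Int) (nietos : Int) : Decidable (Pre_rec n m nietos) := by unfold Pre_rec; infer_instance
def pvWitness_rec : Int × Int × Int := (3, 2, 2)

def Spec_rec (n : Int) (m : Int) (nietos : Int) (out : Int) : Prop := out = rec_alt n m nietos
instance (n : Int) (m : Int) (nietos : Int) (out : Int) : Decidable (Spec_rec n m nietos out) := by unfold Spec_rec; infer_instance

-- ===== CLAIM (what is proved, stated in full; the proofs are below) =====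
def Claim_equal_rec : Prop := ∀ (n : Int) (m : Int) (nietos : Int), Dom_rec n m nietos → Pre_rec n m nietos → Spec_rec n m nietos (rec n m nietos)

-- ===== LEMMAS AND PROOFS =====

-- rec satisfies the plain recurrence (fuel is exact: one unit per unit of nietos)
theorem rec_zero (n m : Int) : rec n m 0 = 1 := by
  simp [rec, recGo]

theorem rec_succ (n m k : Int) (hk : 1 ≤ k) (hn : n ≠ 0) (hm : m ≠ 0) :
    rec n m k = rec (n - 1) m (k - 1) + rec n (m - 1) (k - 1) := by
  have h1 : k.toNat + 1 = ((k - 1).toNat + 1) + 1 := by omega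
  have h2 : ¬ (k = 0) := by omega
  rw [rec, h1]
  simp [recGo, h2, hn, hm, rec]

theorem rec_base (n m k : Int) (hk : 1 ≤ k) (h : n = 0 ∨ m = 0) :
    rec n m k = if n = 0 then (if m ≥ k then 1 else 0) else (if n ≥ k then 1 else 0) := by
  have h1 : k.toNat + 1 = k.toNat - 1 + 1 + 1 := by omega
  have h2 : ¬ (k = 0) := by omega
  rw [rec, h1]
  simp only [recGo, if_neg h2, if_pos h]
  rcases h with h | h <;> split_ifs <;> omega

-- with both kinds of candy still available but fewer candies than grandchildren, no distribution works
theorem rec_big (N : Nat) : ∀ (n m k : Int), n.toNat + m.toNat ≤ N → 0 < n → 0 < m → n + m < k →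
    rec n m k = 0 := by
  induction N with
  | zero => intro n m k hN hn hm _; omega
  | succ N ih =>
    intro n m k hN hn hm hk
    rw [rec_succ n m k (by omega) (by omega) (by omega)]
    have t1 : rec (n - 1) m (k - 1) = 0 := by
      by_cases h : n - 1 = 0
      · rw [rec_base _ _ _ (by omega) (Or.inl h), if_pos h]
        have : ¬ (m ≥ k - 1) := by omega
        rw [if_neg this]
      · exact ih (n - 1) m (k - 1) (by omega) (by omega) hm (by omega)
    have t2 : rec n (m - 1) (k - 1) = 0 := by
      by_cases h : m - 1 = 0
      · rw [rec_base _ _ _ (by omega) (Or.inr h)]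
        rw [if_neg (by omega : ¬ n = 0)]
        have : ¬ (n ≥ k - 1) := by omega
        rw [if_neg this]
      · exact ih n (m - 1) (k - 1) (by omega) hn (by omega) (by omega)
    rw [t1, t2]
    ring

-- row invariant: after cN iterations of the fold, entry i of the row is rec (n-i) (m-k+cN+i) cN
theorem row_inv (n m k : Int) (hk : 1 ≤ k) (cN : Nat) (hc : cN ≤ k.toNat) :
    (List.range cN).foldl (recStep n m k) (List.replicate ((k + 1).toNat) 1)
      = (List.range (k.toNat - cN + 1)).map
          (fun (iN : Nat) => rec (n - (iN : Int)) (m - k + (cN : Int) + (iN : Int)) (cN : Int)) := by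
  induction cN with
  | zero =>
    simp only [List.range_zero, List.foldl_nil]
    have hrep : (k + 1).toNat = k.toNat - 0 + 1 := by omega
    rw [hrep]
    apply List.ext_getElem
    · simp
    · intro i h1 h2
      simp [rec_zero]
  | succ c ih =>
    have hc' : c ≤ k.toNat := by omega
    rw [List.range_succ, List.foldl_append, List.foldl_cons, List.foldl_nil, ih hc']
    unfold recStep
    apply List.ext_getElem
    · simp
    · intro i h1 h2
      simp only [List.getElem_map, List.getElem_range]
      have hi : i ≤ k.toNat - (c + 1) := by simp at h1; omega
      have hlen : ((List.range (k.toNat - c + 1)).map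
          (fun (iN : Nat) => rec (n - (iN : Int)) (m - k + (c : Int) + (iN : Int)) (c : Int))).length
          = k.toNat - c + 1 := by simp
      have hgetD : ∀ j : Nat, j ≤ k.toNat - c →
          ((List.range (k.toNat - c + 1)).map
            (fun (iN : Nat) => rec (n - (iN : Int)) (m - k + (c : Int) + (iN : Int)) (c : Int))).getD j 0
          = rec (n - (j : Int)) (m - k + (c : Int) + (j : Int)) (c : Int) := by
        intro j hj
        rw [List.getD_eq_getElem?_getD, List.getElem?_eq_getElem (by simp; omega)]
        simp
      have hca : ((c : Int) + 1) ≥ 1 := by omega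
      have hcc : ((c + 1 : Nat) : Int) = (c : Int) + 1 := by push_cast; ring
      by_cases ha : n - (i : Int) = 0
      · rw [if_pos ha]
        rw [rec_base _ _ _ (by omega) (Or.inl ha), if_pos ha]
        simp [hcc]
      · rw [if_neg ha]
        by_cases hb : m - k + ((c : Int) + 1) + (i : Int) = 0
        · rw [if_pos hb]
          have hb' : m - k + ((c + 1 : Nat) : Int) + (i : Int) = 0 := by push_cast at hb ⊢; omega
          rw [rec_base _ _ _ (by omega) (Or.inr hb'), if_neg ha]
          simp [hcc]
        · rw [if_neg hb]
          have hb' : m - k + ((c + 1 : Nat) : Int) + (i : Int) ≠ 0 := by push_cast at hb ⊢; omega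
          rw [rec_succ _ _ _ (by omega) ha hb']
          rw [hgetD i (by omega), hgetD (i + 1) (by omega)]
          have e1 : n - (i : Int) - 1 = n - ((i + 1 : Nat) : Int) := by push_cast; ring
          have e2 : m - k + ((c + 1 : Nat) : Int) + (i : Int) - 1 = m - k + (c : Int) + (i : Int) := by push_cast; ring
          have e3 : ((c + 1 : Nat) : Int) - 1 = (c : Int) := by push_cast; ring
          have e4 : m - k + ((c + 1 : Nat) : Int) + (i : Int) = m - k + (c : Int) + ((i + 1 : Nat) : Int) := by push_cast; ring
          rw [e1, e2, e3, e4]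
          ring

-- ===== VERDICT (by name: the statement is the Claim_ definition above) =====
theorem rec_spec : Claim_equal_rec := by
  intro n m k _ hk
  unfold Spec_rec rec_alt
  by_cases h0 : k = 0
  · subst h0; simp [rec_zero]
  · have hk1 : 1 ≤ k := by
      have : (0:Int) ≤ k := hk
      omega
    rw [if_neg h0]
    by_cases hn0 : n = 0
    · rw [if_pos hn0, rec_base _ _ _ hk1 (Or.inl hn0), if_pos hn0]
    rw [if_neg hn0]
    by_cases hm0 : m = 0
    · rw [if_pos hm0, rec_base _ _ _ hk1 (Or.inr hm0), if_neg hn0]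
    rw [if_neg hm0]
    by_cases hbig : 0 < n ∧ 0 < m ∧ n + m < k
    · rw [if_pos hbig, rec_big (n.toNat + m.toNat) n m k (le_refl _) hbig.1 hbig.2.1 hbig.2.2]
    rw [if_neg hbig]
    simp only []
    rw [row_inv n m k hk1 k.toNat (le_refl _)]
    have : k.toNat - k.toNat + 1 = 1 := by omega
    rw [this]
    simp only [List.range_one, List.map_cons, List.map_nil, List.headD_cons]
    congr 1 <;> omega
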